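-- pv_equiv track=rewrite | github.com/wsuzume/fxtrade | fxtrade/interface/bitflyer.py | split_event_list
-- ===== SOURCE A (Python) =====
-- def split_event_list(xs: list) -> dict[str, list]:
--     table = {}
--     for x in xs:
--         day = x['event_date'].split('T')[0]
--         if day not in table:
--             table[day] = [x]
--         else:
--             table[day].append(x)
--     return table
-- ===== SOURCE B (Python) =====
-- def split_event_list(xs: list) -> dict[str, list]:
--     day = lambda x: x['event_date'].split('T')[0]
--     days = dict.fromkeys(day(x) for x in xs)
--     return {d: [x for x in xs if day(x) == d] for d in days}
-- ===== Notes on version B (the rewrite author's own statement) =====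
-- stated objective: alternative
-- what changed: B replaces A's single mutating hash-table pass (insert-or-append per event) with a two-phase comprehension: collect the ordered distinct days with dict.fromkeys, then build each day's list by filtering the input, touching no mutable state.
import Mathlib
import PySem

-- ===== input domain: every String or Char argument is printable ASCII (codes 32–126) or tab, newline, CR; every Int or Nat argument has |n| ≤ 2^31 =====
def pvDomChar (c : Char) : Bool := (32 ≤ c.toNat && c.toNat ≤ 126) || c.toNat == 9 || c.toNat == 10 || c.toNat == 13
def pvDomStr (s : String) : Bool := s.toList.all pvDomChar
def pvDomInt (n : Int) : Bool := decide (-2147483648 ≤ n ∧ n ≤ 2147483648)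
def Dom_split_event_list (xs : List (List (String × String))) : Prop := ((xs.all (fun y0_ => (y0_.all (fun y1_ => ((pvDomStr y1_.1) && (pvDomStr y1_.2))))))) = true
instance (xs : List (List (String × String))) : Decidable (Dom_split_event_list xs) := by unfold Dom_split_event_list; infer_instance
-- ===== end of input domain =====

-- B builds the grouping without mutable state: ordered distinct days first, then one filter per day.

-- ===== PORT A =====
-- day of an event: x['event_date'].split('T')[0]; the dict lookup raises KeyError when the key is
-- absent (excluded by Pre_; the port then reads the default ""), the [0] of a nonempty-sep split never raises
def pvDayA (x : List (String × String)) : String :=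
  ((PySem.Str.split? (((PySem.Dict.mk x).get? "event_date").getD "") "T").getD []).headD ""

def split_event_list (xs : List (List (String × String))) : List (String × List (List (String × String))) :=
  (xs.foldl (fun table x =>
      let day := pvDayA x
      if table.contains day = false then table.insert day [x]
      else table.modify day [] (fun l => l ++ [x]))
    PySem.Dict.empty).items

-- ===== PORT B =====
-- B's day key is the same expression as A's; pvDayA is shared
def split_event_list_alt (xs : List (List (String × String))) : List (String × List (List (String × String))) :=
  let days := PySem.List.dedup (xs.map pvDayA)
  days.map (fun d => (d, xs.filter (fun x => pvDayA x == d)))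

-- ===== PRECONDITION & SPEC =====
-- Pre_ excludes exactly the inputs on which the Python A raises KeyError: an event without an 'event_date' key.
def Pre_split_event_list (xs : List (List (String × String))) : Prop :=
  (xs.all (fun x => x.any (fun p => p.1 == "event_date"))) = true
instance (xs : List (List (String × String))) : Decidable (Pre_split_event_list xs) := by unfold Pre_split_event_list; infer_instance

def pvWitness_split_event_list : (List (List (String × String))) :=
  [[("event_date", "2020-01-01T12:00")], [("event_date", "2020-01-01T13:00")], [("event_date", "2020-01-02")]]

def Spec_split_event_list (xs : List (List (String × String))) (out : List (String × List (List (String × String)))) : Prop := out = split_event_list_alt xs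
instance (xs : List (List (String × String))) (out : List (String × List (List (String × String)))) : Decidable (Spec_split_event_list xs out) := by unfold Spec_split_event_list; infer_instance

-- ===== CLAIM (what is proved, stated in full; the proofs are below) =====
def Claim_equal_split_event_list : Prop := ∀ (xs : List (List (String × String))), Dom_split_event_list xs → Pre_split_event_list xs → Spec_split_event_list xs (split_event_list xs)

-- ===== LEMMAS AND PROOFS =====

-- A's insert-or-append step is exactly 'table[day] = table.get(day, []) + [x]'.
lemma stepA_eq_modify (t : PySem.Dict String (List (List (String × String)))) (x : List (String × String)) :
    (if t.contains (pvDayA x) = false then t.insert (pvDayA x) [x]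
     else t.modify (pvDayA x) [] (fun l => l ++ [x]))
    = t.modify (pvDayA x) [] (fun l => l ++ [x]) := by
  by_cases h : t.contains (pvDayA x) = false
  · rw [if_pos h, PySem.Dict.modify, PySem.Dict.getD_of_not_contains]
    · simp
    · exact h
  · rw [if_neg h]

-- the dict A builds, seen as a pure modify-loop
lemma tableA_eq (xs : List (List (String × String))) :
    (xs.foldl (fun table x =>
        let day := pvDayA x
        if table.contains day = false then table.insert day [x]
        else table.modify day [] (fun l => l ++ [x])) PySem.Dict.empty)
    = xs.foldl (fun t x => t.modify (pvDayA x) [] (fun l => l ++ [x])) PySem.Dict.empty := by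
  apply PySem.List.foldl_congr_mem
  intro t x hx
  exact stepA_eq_modify t x

lemma keysA (xs : List (List (String × String))) :
    (xs.foldl (fun t x => t.modify (pvDayA x) [] (fun l => l ++ [x])) PySem.Dict.empty).keys
    = PySem.List.dedup (xs.map pvDayA) := by
  rw [PySem.Dict.keys_foldl_modify_key xs pvDayA [] (fun _ x l => l ++ [x]) PySem.Dict.empty]
  rw [PySem.List.dedup_eq_ofList]
  rfl

lemma nodup_keysA (xs : List (List (String × String))) :
    (xs.foldl (fun t x => t.modify (pvDayA x) [] (fun l => l ++ [x])) PySem.Dict.empty).keys.Nodup := by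
  exact PySem.Dict.nodup_keys_foldl_modify_key xs pvDayA [] (fun _ x l => l ++ [x]) _ (by simp)

lemma getDA (xs : List (List (String × String))) (c : String) :
    (xs.foldl (fun t x => t.modify (pvDayA x) [] (fun l => l ++ [x])) PySem.Dict.empty).getD c []
    = xs.filter (fun x => pvDayA x == c) := by
  have h := PySem.Dict.getD_foldl_modify_append (xs.map (fun x => (pvDayA x, x)))
      (PySem.Dict.empty (κ := String) (ν := List (List (String × String)))) c
  rw [List.foldl_map] at h
  simpa [Function.comp_def, List.filter_map] using h

-- ===== VERDICT (by name: the statement is the Claim_ definition above) =====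
theorem split_event_list_spec : Claim_equal_split_event_list := by
  intro xs _ _
  unfold Spec_split_event_list split_event_list split_event_list_alt
  rw [tableA_eq, PySem.Dict.items_eq_map_keys _ (nodup_keysA xs) [], keysA]
  have hBA : pvDayA = pvDayA := rfl
  rw [hBA]
  apply List.map_congr_left
  intro d _
  rw [getDA xs d]
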